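-- pv_equiv track=rewrite | github.com/ZhiyuSun/leetcode-practice | 1001-/1417_重新格式化字符串.py | reformat
-- ===== SOURCE A (Python) =====
-- def reformat(s: str) -> str:
--     nums = []
--     chs = []
--     for i in s:
--         if i.isalpha():
--             nums.append(i)
--         else:
--             chs.append(i)
--     res = ''
--     if abs(len(nums)-len(chs)) < 2:
--         if len(nums) < len(chs):
--             chs, nums = nums, chs
--         l = len(nums) + len(chs)
--         for i in range(l):
--             if i % 2 == 0:
--                 res += nums[i//2]
--             else:
--                 res += chs[i//2]
--         return res
--     return ""
-- ===== SOURCE B (Python) =====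
-- def reformat(s: str) -> str:
--     letters = [c for c in s if c.isalpha()]
--     others = [c for c in s if not c.isalpha()]
--     if abs(len(letters) - len(others)) >= 2:
--         return ""
--     if len(letters) < len(others):
--         letters, others = others, letters
--     return _interleave(letters, others)
--
--
-- def _interleave(a, b):
--     # take the head of a, then continue with the roles of a and b swapped
--     out = []
--     while a:
--         out.append(a[0])
--         a, b = b, a[1:]
--     return "".join(out)
-- ===== Notes on version B (the rewrite author's own statement) =====
-- stated objective: simpler
-- what changed: Replaces the single-pass append partition plus the index loop with i%2/i//2 arithmetic by two filter comprehensions and a short head-swap interleave loop (take the head of one list, then swap the two lists).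
import Mathlib
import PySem

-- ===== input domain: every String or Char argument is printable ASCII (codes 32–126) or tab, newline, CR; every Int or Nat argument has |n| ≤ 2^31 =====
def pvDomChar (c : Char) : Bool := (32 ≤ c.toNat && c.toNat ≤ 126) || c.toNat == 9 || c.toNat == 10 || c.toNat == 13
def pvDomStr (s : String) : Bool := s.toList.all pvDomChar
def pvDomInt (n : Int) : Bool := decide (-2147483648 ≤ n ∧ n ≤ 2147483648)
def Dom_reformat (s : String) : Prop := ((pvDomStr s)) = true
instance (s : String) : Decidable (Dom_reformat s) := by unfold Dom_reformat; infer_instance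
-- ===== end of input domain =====

-- B is a simpler decomposition (two filters + a head-swap interleave loop); return values proved equal on all inputs.

-- ===== PORT A =====
def reformat (s : String) : String :=
  let p := s.toList.foldl
    (fun (p : List Char × List Char) i =>
      if PySem.Chars.isalpha i then (p.1 ++ [i], p.2) else (p.1, p.2 ++ [i]))
    ([], [])
  let nums := p.1
  let chs := p.2
  if |(nums.length : Int) - (chs.length : Int)| < 2 then
    let q := if nums.length < chs.length then (nums, chs) else (chs, nums)
    let chs := q.1
    let nums := q.2
    let l : Int := (nums.length : Int) + (chs.length : Int)
    let res := (PySem.List.pyRange 0 l 1).foldl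
      (fun res i =>
        if PySem.Int.mod i 2 = 0 then res ++ [PySem.List.pyGetD nums (PySem.Int.floordiv i 2) ' ']
        else res ++ [PySem.List.pyGetD chs (PySem.Int.floordiv i 2) ' ']) []
    String.ofList res
  else ""

-- ===== PORT B =====
-- iterative interleave: append the head of a to the accumulator, then swap the roles of a and b
def interleaveT : List Char → List Char → List Char → List Char
  | acc, [], _ => acc
  | acc, x :: as, bs => interleaveT (acc ++ [x]) bs as
termination_by acc a b => a.length + b.length
decreasing_by simp; omega

def reformat_alt (s : String) : String :=
  let letters := s.toList.filter (fun c => PySem.Chars.isalpha c)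
  let others := s.toList.filter (fun c => !PySem.Chars.isalpha c)
  if |(letters.length : Int) - (others.length : Int)| ≥ 2 then ""
  else
    let q := if letters.length < others.length then (others, letters) else (letters, others)
    String.ofList (interleaveT [] q.1 q.2)

-- ===== PRECONDITION & SPEC =====
def Spec_reformat (s : String) (out : String) : Prop := out = reformat_alt s
instance (s : String) (out : String) : Decidable (Spec_reformat s out) := by unfold Spec_reformat; infer_instance

-- ===== CLAIM (what is proved, stated in full; the proofs are below) =====
def Claim_equal_reformat : Prop := ∀ (s : String), Dom_reformat s → Spec_reformat s (reformat s)

-- ===== LEMMAS AND PROOFS =====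

-- proof-only recursion: the cons form of the interleave
def interleaveB : List Char → List Char → List Char
  | [], _ => []
  | a :: as, bs => a :: interleaveB bs as
termination_by a b => a.length + b.length
decreasing_by simp; omega

-- the accumulator loop computes the cons-form interleave
lemma interleaveT_eq : ∀ (n : Nat) (a b acc : List Char), a.length + b.length = n →
    interleaveT acc a b = acc ++ interleaveB a b := by
  intro n
  induction n with
  | zero =>
    intro a b acc hn
    cases a with
    | nil => simp [interleaveT, interleaveB]
    | cons x as => simp at hn
  | succ m ih =>
    intro a b acc hn
    cases a with
    | nil => simp [interleaveT, interleaveB]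
    | cons x as =>
      rw [interleaveT, interleaveB, ih b as (acc ++ [x]) (by simp at hn ⊢; omega)]
      simp

-- A's partition loop is the pair of filters
lemma partition_foldl (l : List Char) (xs ys : List Char) :
    l.foldl (fun (p : List Char × List Char) i =>
      if PySem.Chars.isalpha i then (p.1 ++ [i], p.2) else (p.1, p.2 ++ [i])) (xs, ys)
    = (xs ++ l.filter (fun c => PySem.Chars.isalpha c),
       ys ++ l.filter (fun c => !PySem.Chars.isalpha c)) := by
  induction l generalizing xs ys with
  | nil => simp
  | cons c cs ih =>
    by_cases h : PySem.Chars.isalpha c = true <;> simp [h, ih]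

-- the index map 0,1,2,… with i%2 / i//2 lookups is the recursive interleave
lemma range_map_interleave : ∀ (n : Nat) (a b : List Char),
    a.length + b.length = n → b.length ≤ a.length → a.length ≤ b.length + 1 →
    (List.range n).map (fun k => if k % 2 = 0 then a.getD (k / 2) ' ' else b.getD (k / 2) ' ')
      = interleaveB a b := by
  intro n
  induction n with
  | zero =>
    intro a b hn _ _
    cases a with
    | nil => simp [interleaveB]
    | cons x as => simp at hn
  | succ m ih =>
    intro a b hn h1 h2
    cases a with
    | nil => cases b <;> simp_all
    | cons x as =>
      rw [List.range_succ_eq_map]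
      simp only [List.map_cons, List.map_map]
      rw [interleaveB]
      congr 1
      have hfun : ((fun k => if k % 2 = 0 then (x :: as).getD (k / 2) ' ' else b.getD (k / 2) ' ') ∘ Nat.succ)
          = (fun k => if k % 2 = 0 then b.getD (k / 2) ' ' else as.getD (k / 2) ' ') := by
        funext k
        rcases Nat.even_or_odd k with ⟨j, hj⟩ | ⟨j, hj⟩
        · subst hj
          have e1 : (j + j + 1) % 2 = 1 := by omega
          have e2 : (j + j + 1) / 2 = j := by omega
          have e3 : (j + j) % 2 = 0 := by omega
          have e4 : (j + j) / 2 = j := by omega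
          simp [Function.comp, Nat.succ_eq_add_one, e1, e2, e3, e4]
        · subst hj
          have e1 : (2 * j + 1 + 1) % 2 = 0 := by omega
          have e2 : (2 * j + 1 + 1) / 2 = j + 1 := by omega
          have e3 : (2 * j + 1) % 2 = 1 := by omega
          have e4 : (2 * j + 1) / 2 = j := by omega
          simp [Function.comp, Nat.succ_eq_add_one, e1, e2, e3, e4, List.getD]
      rw [hfun]
      apply ih
      · simp at hn; omega
      · simp at h2; omega
      · simp at h1; omega

-- an if inside the loop body moves into the appended singleton, then the loop is a map
lemma foldl_ite_append {α β : Type} (p : β → Prop) [DecidablePred p] (u v : β → α)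
    (l : List β) (init : List α) :
    l.foldl (fun acc x => if p x then acc ++ [u x] else acc ++ [v x]) init
      = init ++ l.map (fun x => if p x then u x else v x) := by
  have h : (fun (acc : List α) x => if p x then acc ++ [u x] else acc ++ [v x])
      = fun acc x => acc ++ [if p x then u x else v x] := by
    funext acc x; split <;> rfl
  rw [h, PySem.List.foldl_append_singleton_eq_map]

-- ===== VERDICT (by name: the statement is the Claim_ definition above) =====
theorem reformat_spec : Claim_equal_reformat := by
  intro s _
  unfold Spec_reformat reformat reformat_alt
  rw [partition_foldl]
  simp only [List.nil_append]
  set L := (s.toList).filter (fun c => PySem.Chars.isalpha c) with hL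
  set O := (s.toList).filter (fun c => !PySem.Chars.isalpha c) with hO
  by_cases hg : |(L.length : Int) - (O.length : Int)| < 2
  · rw [if_pos hg, if_neg (not_le.mpr hg)]
    obtain ⟨hlo, hhi⟩ := abs_lt.mp hg
    by_cases hs : L.length < O.length
    · simp only [if_pos hs]
      have hb1 : L.length ≤ O.length := le_of_lt hs
      have hb2 : O.length ≤ L.length + 1 := by omega
      rw [show ((O.length : Int) + (L.length : Int)) = ((O.length + L.length : Nat) : Int) by push_cast; ring,
          PySem.List.pyRange_zero_nat]
      rw [List.foldl_map, foldl_ite_append, List.nil_append,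
          interleaveT_eq (O.length + L.length) O L [] rfl, List.nil_append]
      congr 1
      rw [← range_map_interleave (O.length + L.length) O L rfl hb1 hb2]
      apply List.map_congr_left
      intro k _
      have h1 : PySem.Int.mod (k:Int) 2 = ((k % 2 : Nat) : Int) := by
        exact_mod_cast PySem.Int.mod_natCast k 2
      have h2 : PySem.Int.floordiv (k:Int) 2 = ((k / 2 : Nat) : Int) := by
        exact_mod_cast PySem.Int.floordiv_natCast k 2
      rw [h1, h2]
      by_cases hk : k % 2 = 0
      · rw [if_pos (by omega), PySem.List.pyGetD_natCast, if_pos hk]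
      · rw [if_neg (by omega), PySem.List.pyGetD_natCast, if_neg hk]
    · simp only [if_neg hs]
      have hb1 : O.length ≤ L.length := by omega
      have hb2 : L.length ≤ O.length + 1 := by omega
      rw [show ((L.length : Int) + (O.length : Int)) = ((L.length + O.length : Nat) : Int) by push_cast; ring,
          PySem.List.pyRange_zero_nat]
      rw [List.foldl_map, foldl_ite_append, List.nil_append,
          interleaveT_eq (L.length + O.length) L O [] rfl, List.nil_append]
      congr 1
      rw [← range_map_interleave (L.length + O.length) L O rfl hb1 hb2]
      apply List.map_congr_left
      intro k _
      have h1 : PySem.Int.mod (k:Int) 2 = ((k % 2 : Nat) : Int) := by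
        exact_mod_cast PySem.Int.mod_natCast k 2
      have h2 : PySem.Int.floordiv (k:Int) 2 = ((k / 2 : Nat) : Int) := by
        exact_mod_cast PySem.Int.floordiv_natCast k 2
      rw [h1, h2]
      by_cases hk : k % 2 = 0
      · rw [if_pos (by omega), PySem.List.pyGetD_natCast, if_pos hk]
      · rw [if_neg (by omega), PySem.List.pyGetD_natCast, if_neg hk]
  · rw [if_neg hg, if_pos (not_lt.mp hg)]
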